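-- pv_equiv track=rewrite | github.com/seungh0/programmers-algorithm | 202103/20210326/2512.py | solution
-- ===== SOURCE A (Python) =====
-- def calculate(numbers, mid):
--     sum = 0
--     for i in numbers:
--         sum += min(mid, i)
--     return sum
--
-- def solution(n, numbers, value):
--     left = 0
--     right = max(numbers)
--     answer = -1
--     while left <= right:
--         mid = (left + right) // 2
--         result = calculate(numbers, mid)
--         if result <= value:
--             answer = mid
--             left = mid + 1
--         else:
--             right = mid - 1
--     return answer
-- ===== SOURCE B (Python) =====
-- def solution(n, numbers, value):
--     # sort + prefix sums: find the linear segment of f(mid)=sum(min(mid,x)) and solve for mid directly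
--     R = max(numbers)
--     if R < 0:
--         return -1
--     s = sorted(numbers)
--     m = len(s)
--     pref = [0]
--     for x in s:
--         pref.append(pref[-1] + x)
--     if pref[m] <= value:
--         return R
--     for k in range(m - 1, -1, -1):
--         hi = s[k] - 1
--         if hi < 0:
--             break
--         lo = s[k - 1] if k > 0 else 0
--         cand = min((value - pref[k]) // (m - k), hi)
--         if cand >= lo and cand >= 0:
--             return cand
--     return -1
-- ===== Notes on version B (the rewrite author's own statement) =====
-- stated objective: faster
-- what changed: Replaces A's binary search on mid (recomputing sum(min(mid,x)) over the whole list each probe, O(n log max)) by sorting once with prefix sums and solving mid in closed form on the linear segment of f(mid)=sum(min(mid,x)), scanning segments top-down (O(n log n)).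
import Mathlib
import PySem

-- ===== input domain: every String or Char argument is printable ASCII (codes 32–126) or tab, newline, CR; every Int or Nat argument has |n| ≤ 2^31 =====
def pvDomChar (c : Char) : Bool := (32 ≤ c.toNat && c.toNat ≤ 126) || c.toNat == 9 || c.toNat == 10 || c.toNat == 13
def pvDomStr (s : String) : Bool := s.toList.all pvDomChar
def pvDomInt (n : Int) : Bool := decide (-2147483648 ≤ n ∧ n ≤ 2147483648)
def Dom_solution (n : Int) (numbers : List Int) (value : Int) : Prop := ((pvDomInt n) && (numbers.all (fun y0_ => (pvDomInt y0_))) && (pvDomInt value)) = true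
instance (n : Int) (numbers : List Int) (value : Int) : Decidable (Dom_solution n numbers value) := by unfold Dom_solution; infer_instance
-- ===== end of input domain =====

-- B replaces A's binary search over mid (O(n log max)) by sort + prefix sums and a direct
-- closed-form solve of mid on the linear segment of f(mid) = sum(min(mid, x)) (O(n log n)).

-- ===== PORT A =====
def calculate (numbers : List Int) (mid : Int) : Int :=
  numbers.foldl (fun sum i => sum + min mid i) 0

def solLoop (numbers : List Int) (value : Int) (left right answer : Int) : Int :=
  if h : left ≤ right then
    let mid := PySem.Int.floordiv (left + right) 2
    if calculate numbers mid ≤ value then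
      solLoop numbers value (mid + 1) right mid
    else
      solLoop numbers value left (mid - 1) answer
  else answer
termination_by (right + 1 - left).toNat
decreasing_by
  · have := PySem.Int.floordiv_two_mid_bounds h; omega
  · have := PySem.Int.floordiv_two_mid_bounds h; omega

def solution (n : Int) (numbers : List Int) (value : Int) : Int :=
  match PySem.List.max? numbers (fun x => x) with
  | none => -1   -- Python raises ValueError here (max of empty list); excluded by Pre_solution
  | some r => solLoop numbers value 0 r (-1)

-- ===== PORT B =====
-- descending scan over the segments of sorted(numbers): index t-1, t-2, …, 0
def altScan (s pref : List Int) (m : Nat) (value : Int) : Nat → Int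
  | 0 => -1
  | k+1 =>
    let hi := PySem.List.pyGetD s (k : Int) 0 - 1
    if hi < 0 then -1
    else
      let lo := if 0 < k then PySem.List.pyGetD s ((k : Int) - 1) 0 else 0
      let cand := min (PySem.Int.floordiv (value - PySem.List.pyGetD pref (k : Int) 0) ((m : Int) - (k : Int))) hi
      if lo ≤ cand ∧ 0 ≤ cand then cand else altScan s pref m value k

def solution_alt (n : Int) (numbers : List Int) (value : Int) : Int :=
  match PySem.List.max? numbers (fun x => x) with
  | none => -1   -- unreachable under Pre_solution
  | some r =>
    if r < 0 then -1
    else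
      let s := PySem.List.sorted numbers (fun x => x) false
      let m := s.length
      let pref := s.foldl (fun p x => p ++ [PySem.List.pyGetD p (-1) 0 + x]) [0]
      if PySem.List.pyGetD pref (m : Int) 0 ≤ value then r
      else altScan s pref m value m

-- ===== PRECONDITION & SPEC =====
-- Pre_ excludes only the empty list, on which A's max(numbers) raises ValueError.
def Pre_solution (n : Int) (numbers : List Int) (value : Int) : Prop := numbers ≠ []
instance (n : Int) (numbers : List Int) (value : Int) : Decidable (Pre_solution n numbers value) := by unfold Pre_solution; infer_instance
def pvWitness_solution : Int × List Int × Int := (3, [1, 2, 3], 4)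

def Spec_solution (n : Int) (numbers : List Int) (value : Int) (out : Int) : Prop := out = solution_alt n numbers value
instance (n : Int) (numbers : List Int) (value : Int) (out : Int) : Decidable (Spec_solution n numbers value out) := by unfold Spec_solution; infer_instance

-- ===== CLAIM (what is proved, stated in full; the proofs are below) =====
def Claim_equal_solution : Prop := ∀ (n : Int) (numbers : List Int) (value : Int), Dom_solution n numbers value → Pre_solution n numbers value → Spec_solution n numbers value (solution n numbers value)

-- ===== LEMMAS AND PROOFS =====

-- f(mid) as a sum, and its basic properties
lemma calc_eq_sum (numbers : List Int) (mid : Int) :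
    calculate numbers mid = (numbers.map (fun x => min mid x)).sum := by
  simpa using PySem.List.foldl_add numbers (fun x => min mid x) 0

lemma calc_mono (numbers : List Int) {a b : Int} (h : a ≤ b) :
    calculate numbers a ≤ calculate numbers b := by
  rw [calc_eq_sum, calc_eq_sum]
  exact List.sum_le_sum (fun x _ => by simp [min_le_min_right x h])

lemma calc_perm {xs ys : List Int} (h : xs.Perm ys) (mid : Int) :
    calculate xs mid = calculate ys mid := by
  rw [calc_eq_sum, calc_eq_sum]
  exact (h.map _).sum_eq

-- on a linear segment of f, f(mid) = (prefix sum at k) + mid * (number of larger elements)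
lemma calc_split (s : List Int) (k : Nat) (hk : k ≤ s.length) (mid : Int)
    (hlow : ∀ x ∈ s.take k, x ≤ mid) (hhigh : ∀ x ∈ s.drop k, mid < x) :
    calculate s mid = (s.take k).sum + mid * ((s.length : Int) - k) := by
  conv_lhs => rw [calc_eq_sum, ← List.take_append_drop k s]
  rw [List.map_append, List.sum_append]
  have h1 : (s.take k).map (fun x => min mid x) = s.take k := by
    trans (s.take k).map (fun x => x)
    · exact List.map_congr_left (fun x hx => min_eq_right (hlow x hx))
    · simp
  have h2 : (s.drop k).map (fun x => min mid x) = (s.drop k).map (fun _ => mid) :=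
    List.map_congr_left (fun x hx => min_eq_left (le_of_lt (hhigh x hx)))
  rw [h1, h2, PySem.List.sum_map_const_int]
  have : ((s.drop k).length : Int) = (s.length : Int) - k := by
    simp [List.length_drop]; omega
  rw [this]; ring

-- in a (≤)-sorted list, everything in take k is ≤ s[k-1], everything in drop k is ≥ s[k]
lemma sorted_take_le (s : List Int) (hsort : s.Pairwise (· ≤ ·)) (k : Nat)
    (hk : k ≤ s.length) (hk0 : 0 < k) : ∀ x ∈ s.take k, x ≤ s.getD (k - 1) 0 := by
  intro x hx
  rw [List.mem_iff_getElem] at hx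
  obtain ⟨i, hi, rfl⟩ := hx
  have hi' : i < k := by simpa using lt_of_lt_of_le hi (by simp)
  have hklt : k - 1 < s.length := by omega
  rw [List.getD_eq_getElem s 0 hklt, List.getElem_take]
  rcases Nat.lt_or_ge i (k - 1) with h | h
  · exact (List.pairwise_iff_getElem.mp hsort) i (k - 1) (by omega) hklt h
  · have : i = k - 1 := by omega
    subst this; exact le_refl _

lemma sorted_drop_ge (s : List Int) (hsort : s.Pairwise (· ≤ ·)) (k : Nat)
    (hk : k < s.length) : ∀ x ∈ s.drop k, s.getD k 0 ≤ x := by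
  intro x hx
  rw [List.mem_iff_getElem] at hx
  obtain ⟨i, hi, rfl⟩ := hx
  have hi' : k + i < s.length := by
    rw [List.length_drop] at hi; omega
  rw [List.getElem_drop, List.getD_eq_getElem s 0 hk]
  rcases Nat.eq_zero_or_pos i with h | h
  · subst h; simp
  · exact (List.pairwise_iff_getElem.mp hsort) k (k + i) hk hi' (by omega)

-- the characterization both programs satisfy: a is -1 and nothing is feasible,
-- or a is the greatest feasible mid in [0, R]
def Good (P : Int → Prop) (R a : Int) : Prop :=
  (a = -1 ∧ ¬ P 0) ∨ (0 ≤ a ∧ a ≤ R ∧ P a ∧ (a < R → ¬ P (a + 1)))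

lemma Good_unique {P : Int → Prop} {R a b : Int}
    (hdc : ∀ x y : Int, x ≤ y → P y → P x) (ha : Good P R a) (hb : Good P R b) : a = b := by
  rcases ha with ⟨ha1, ha0⟩ | ⟨ha0, haR, haP, haS⟩ <;>
    rcases hb with ⟨hb1, hb0⟩ | ⟨hb0, hbR, hbP, hbS⟩
  · rw [ha1, hb1]
  · exact absurd (hdc 0 b hb0 hbP) ha0
  · exact absurd (hdc 0 a ha0 haP) hb0
  · by_contra hne
    rcases lt_or_gt_of_ne hne with h | h
    · exact haS (by omega) (hdc (a + 1) b (by omega) hbP)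
    · exact hbS (by omega) (hdc (b + 1) a (by omega) haP)

-- A's binary search maintains: answer = left - 1 is feasible (or -1), everything above right is not
lemma solLoop_good (numbers : List Int) (value R : Int) (hR : 0 ≤ R) :
    ∀ fuel : Nat, ∀ left right answer : Int, (right + 1 - left).toNat ≤ fuel →
      0 ≤ left → left ≤ right + 1 → right ≤ R →
      answer = left - 1 →
      (0 < left → calculate numbers (left - 1) ≤ value) →
      (right < R → ¬ calculate numbers (right + 1) ≤ value) →
      Good (fun m => calculate numbers m ≤ value) R (solLoop numbers value left right answer) := by
  intro fuel
  induction fuel with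
  | zero =>
    intro left right answer hfuel h0 h1 h2 h3 h4 h5
    have hgt : ¬ left ≤ right := by omega
    rw [solLoop, dif_neg hgt]
    have hlr : left = right + 1 := by omega
    rcases Int.lt_or_le answer 0 with ha | ha
    · left
      have : answer = -1 := by omega
      refine ⟨this, ?_⟩
      have : right < R := by omega
      have h := h5 this
      have : right + 1 = 0 := by omega
      rwa [this] at h
    · right
      exact ⟨ha, by omega, by simpa [h3, hlr] using h4 (by omega), fun h => by
        have := h5 (by omega); simpa [h3, hlr] using this⟩
  | succ n ih =>
    intro left right answer hfuel h0 h1 h2 h3 h4 h5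
    by_cases hle : left ≤ right
    · rw [solLoop, dif_pos hle]
      have hmid := PySem.Int.floordiv_two_mid_bounds hle
      set mid := PySem.Int.floordiv (left + right) 2 with hmiddef
      by_cases hcalc : calculate numbers mid ≤ value
      · rw [if_pos hcalc]
        exact ih (mid + 1) right mid (by omega) (by omega) (by omega) h2
          (by omega) (fun _ => by simpa using hcalc) h5
      · rw [if_neg hcalc]
        exact ih left (mid - 1) answer (by omega) h0 (by omega) (by omega) h3 h4
          (fun _ => by simpa using hcalc)
    · rw [solLoop, dif_neg hle]
      have hlr : left = right + 1 := by omega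
      rcases Int.lt_or_le answer 0 with ha | ha
      · left
        have hm1 : answer = -1 := by omega
        refine ⟨hm1, ?_⟩
        have h := h5 (by omega)
        have hz : right + 1 = 0 := by omega
        rwa [hz] at h
      · right
        exact ⟨ha, by omega, by simpa [h3, hlr] using h4 (by omega), fun h => by
          have := h5 (by omega); simpa [h3, hlr] using this⟩

-- the prefix-sum list B builds
lemma pref_eq (s : List Int) :
    s.foldl (fun p x => p ++ [PySem.List.pyGetD p (-1) 0 + x]) [0]
      = (List.range (s.length + 1)).map (fun k => (s.take k).sum) := by
  induction s using List.reverseRecOn with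
  | nil => rfl
  | append_singleton s x ih =>
    rw [List.foldl_append, ih]
    simp only [List.foldl_cons, List.foldl_nil]
    have hsplit : (List.range (s.length + 1)).map (fun k => (s.take k).sum)
        = (List.range s.length).map (fun k => (s.take k).sum) ++ [(s.take s.length).sum] := by
      rw [List.range_succ, List.map_append]; rfl
    rw [hsplit, PySem.List.pyGetD_neg_one_append_singleton, ← hsplit]
    have hlen : (s ++ [x]).length + 1 = (s.length + 1) + 1 := by simp
    rw [hlen]
    conv_rhs => rw [List.range_succ, List.map_append]
    congr 1
    · exact List.map_congr_left (fun k hk => by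
        rw [List.mem_range] at hk
        rw [List.take_append_of_le_length (by omega)])
    · simp

lemma altScan_succ (s pref : List Int) (m : Nat) (value : Int) (k : Nat) :
    altScan s pref m value (k+1) =
      if PySem.List.pyGetD s (k : Int) 0 - 1 < 0 then -1
      else if (if 0 < k then PySem.List.pyGetD s ((k : Int) - 1) 0 else 0) ≤
              min (PySem.Int.floordiv (value - PySem.List.pyGetD pref (k : Int) 0) ((m : Int) - (k : Int))) (PySem.List.pyGetD s (k : Int) 0 - 1) ∧
              0 ≤ min (PySem.Int.floordiv (value - PySem.List.pyGetD pref (k : Int) 0) ((m : Int) - (k : Int))) (PySem.List.pyGetD s (k : Int) 0 - 1)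
           then min (PySem.Int.floordiv (value - PySem.List.pyGetD pref (k : Int) 0) ((m : Int) - (k : Int))) (PySem.List.pyGetD s (k : Int) 0 - 1)
           else altScan s pref m value k := rfl

lemma altScan_good (numbers s : List Int) (value R : Int)
    (hperm : s.Perm numbers) (hsort : s.Pairwise (· ≤ ·))
    (hub : ∀ x ∈ s, x ≤ R) (hR : 0 ≤ R) :
    ∀ t : Nat, t ≤ s.length →
      (∀ mid : Int, 0 ≤ mid → mid ≤ R → (t = 0 ∨ s.getD (t - 1) 0 ≤ mid) →
        ¬ calculate numbers mid ≤ value) →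
      Good (fun m => calculate numbers m ≤ value) R
        (altScan s ((List.range (s.length + 1)).map (fun k => (s.take k).sum)) s.length value t) := by
  intro t
  induction t with
  | zero =>
    intro _ hInv
    exact Or.inl ⟨rfl, hInv 0 le_rfl hR (Or.inl rfl)⟩
  | succ k ih =>
    intro hk hInv
    have hklen : k < s.length := hk
    have hgetk : PySem.List.pyGetD s (k : Int) 0 = s[k] := by
      rw [PySem.List.pyGetD_natCast, List.getD_eq_getElem s 0 hklen]
    have hprefk : PySem.List.pyGetD ((List.range (s.length + 1)).map (fun j => (s.take j).sum)) (k : Int) 0 = (s.take k).sum := by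
      rw [PySem.List.pyGetD_natCast]
      exact PySem.List.getD_map_range _ _ _ _ (by omega)
    have hgetDk : s.getD (k + 1 - 1) 0 = s[k] := by
      simp only [Nat.add_sub_cancel]
      exact List.getD_eq_getElem s 0 hklen
    rw [altScan_succ, hgetk, hprefk]
    by_cases hneg : s[k] - 1 < 0
    · rw [if_pos hneg]
      exact Or.inl ⟨rfl, hInv 0 le_rfl hR (Or.inr (by rw [hgetDk]; omega))⟩
    · rw [if_neg hneg]
      have hb : (0 : Int) < (s.length : Int) - (k : Int) := by
        have : (k : Int) < (s.length : Int) := by exact_mod_cast hklen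
        omega
      set q := PySem.Int.floordiv (value - (s.take k).sum) ((s.length : Int) - (k : Int)) with hqdef
      set cand := min q (s[k] - 1) with hcanddef
      have hcand_le : cand ≤ s[k] - 1 := min_le_right _ _
      have hcand_q : cand ≤ q := min_le_left _ _
      have hskR : s[k] ≤ R := hub _ (s.getElem_mem hklen)
      have hgetk1 : 0 < k → PySem.List.pyGetD s ((k : Int) - 1) 0 = s.getD (k - 1) 0 := by
        intro h
        have h1 : (k : Int) - 1 = ((k - 1 : Nat) : Int) := by
          rw [Nat.cast_sub h]; simp
        rw [h1, PySem.List.pyGetD_natCast]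
      -- the value of f on the segment below s[k]
      have hseg : ∀ mid : Int, (0 < k → s.getD (k - 1) 0 ≤ mid) → mid < s[k] →
          calculate numbers mid = (s.take k).sum + mid * ((s.length : Int) - (k : Int)) := by
        intro mid hlo hhi
        rw [← calc_perm hperm mid]
        apply calc_split s k (le_of_lt hklen) mid
        · intro x hx
          rcases Nat.eq_zero_or_pos k with h0 | h0
          · subst h0; simp at hx
          · exact le_trans (sorted_take_le s hsort k (le_of_lt hklen) h0 x hx) (hlo h0)
        · intro x hx
          have h := sorted_drop_ge s hsort k hklen x hx
          rw [List.getD_eq_getElem s 0 hklen] at h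
          omega
      by_cases hfeas : (if 0 < k then PySem.List.pyGetD s ((k : Int) - 1) 0 else 0) ≤ cand ∧ 0 ≤ cand
      · rw [if_pos hfeas]
        have hlok : 0 < k → s.getD (k - 1) 0 ≤ cand := by
          intro h0
          have := hfeas.1
          rwa [if_pos h0, hgetk1 h0] at this
        have hcandR : cand < R := by omega
        refine Or.inr ⟨hfeas.2, by omega, ?_, ?_⟩
        · show calculate numbers cand ≤ value
          rw [hseg cand hlok (by omega)]
          have h1 : cand * ((s.length : Int) - (k : Int)) ≤ value - (s.take k).sum :=
            (PySem.Int.le_floordiv_iff_mul_le hb).mp hcand_q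
          linarith
        · intro _ hP
          replace hP : calculate numbers (cand + 1) ≤ value := hP
          by_cases hch : cand < s[k] - 1
          · have hcq : cand = q := by
              rcases le_total q (s[k] - 1) with h | h
              · rw [hcanddef, min_eq_left h]
              · rw [hcanddef, min_eq_right h] at hch ⊢; omega
            rw [hseg (cand + 1) (fun h0 => by have := hlok h0; omega) (by omega)] at hP
            have h1 : (cand + 1) * ((s.length : Int) - (k : Int)) ≤ value - (s.take k).sum := by linarith
            have h2 := (PySem.Int.le_floordiv_iff_mul_le hb).mpr h1
            omega
          · exact hInv (cand + 1) (by omega) (by omega) (Or.inr (by rw [hgetDk]; omega)) hP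
      · rw [if_neg hfeas]
        apply ih (by omega)
        intro mid h0 hmR hcond
        by_cases hms : s[k] ≤ mid
        · exact hInv mid h0 hmR (Or.inr (by rw [hgetDk]; exact hms))
        · push_neg at hms
          have hlom : 0 < k → s.getD (k - 1) 0 ≤ mid := by
            intro hk0
            rcases hcond with h | h
            · omega
            · exact h
          have hqm : q < mid := by
            by_contra hle
            push_neg at hle
            apply hfeas
            have hmc : mid ≤ cand := le_min hle (by omega)
            constructor
            · rcases Nat.eq_zero_or_pos k with hk0 | hk0
              · subst hk0; simp; omega
              · rw [if_pos hk0, hgetk1 hk0]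
                exact le_trans (hlom hk0) hmc
            · omega
          intro hP
          replace hP : calculate numbers mid ≤ value := hP
          rw [hseg mid hlom hms] at hP
          have h1 : mid * ((s.length : Int) - (k : Int)) ≤ value - (s.take k).sum := by linarith
          have h2 := (PySem.Int.le_floordiv_iff_mul_le hb).mpr h1
          omega

-- everything in a (≤)-sorted list is at most its last element
lemma sorted_le_last (s : List Int) (hsort : s.Pairwise (· ≤ ·)) :
    ∀ x ∈ s, x ≤ s.getD (s.length - 1) 0 := by
  intro x hx
  obtain ⟨i, hi, rfl⟩ := List.mem_iff_getElem.mp hx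
  rw [List.getD_eq_getElem s 0 (by omega)]
  rcases Nat.lt_or_ge i (s.length - 1) with h | h
  · exact List.pairwise_iff_getElem.mp hsort i (s.length - 1) hi (by omega) h
  · have h' : i = s.length - 1 := by omega
    subst h'; exact le_rfl

-- ===== VERDICT (by name: the statement is the Claim_ definition above) =====
theorem solution_spec : Claim_equal_solution := by
  intro n numbers value _ hpre
  unfold Spec_solution solution solution_alt
  cases hmax : PySem.List.max? numbers (fun x => x) with
  | none => exact absurd ((PySem.List.max?_eq_none_iff numbers _).mp hmax) hpre
  | some r =>
    simp only []
    have hub0 : ∀ x ∈ numbers, x ≤ r := PySem.List.max?_isMax hmax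
    have hrmem : r ∈ numbers := PySem.List.max?_mem hmax
    by_cases hr : r < 0
    · rw [if_pos hr, solLoop, dif_neg (by omega)]
    · rw [if_neg hr]
      push_neg at hr
      set s := PySem.List.sorted numbers (fun x => x) false with hs
      have hperm : s.Perm numbers := PySem.List.sorted_perm numbers _ false
      have hsort : s.Pairwise (· ≤ ·) := PySem.List.sorted_pairwise numbers (fun x => x)
      have hub : ∀ x ∈ s, x ≤ r := fun x hx => hub0 x (hperm.mem_iff.mp hx)
      have hrs : r ∈ s := hperm.mem_iff.mpr hrmem
      have hlen : 0 < s.length := List.length_pos_of_mem hrs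
      have hdc : ∀ x y : Int, x ≤ y → calculate numbers y ≤ value → calculate numbers x ≤ value :=
        fun x y hxy hy => le_trans (calc_mono numbers hxy) hy
      have hA : Good (fun m => calculate numbers m ≤ value) r (solLoop numbers value 0 r (-1)) :=
        solLoop_good numbers value r hr (r + 1).toNat 0 r (-1) (by omega) (by omega) (by omega)
          (by omega) (by omega) (fun h => absurd h (by omega)) (fun h => absurd h (by omega))
      have hsum : calculate numbers r = s.sum := by
        rw [← calc_perm hperm r, calc_split s s.length le_rfl r
          (fun x hx => hub x (by simpa using hx)) (fun x hx => by simp at hx)]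
        simp
      have hprefm : PySem.List.pyGetD ((List.range (s.length + 1)).map (fun j => (s.take j).sum)) (s.length : Int) 0 = s.sum := by
        rw [PySem.List.pyGetD_natCast, PySem.List.getD_map_range _ _ _ _ (by omega)]
        simp
      rw [pref_eq, hprefm]
      by_cases htot : s.sum ≤ value
      · rw [if_pos htot]
        exact Good_unique hdc hA (Or.inr ⟨hr, le_rfl, by show calculate numbers r ≤ value; rw [hsum]; exact htot,
          fun h => absurd h (lt_irrefl r)⟩)
      · rw [if_neg htot]
        apply Good_unique hdc hA
        apply altScan_good numbers s value r hperm hsort hub hr s.length le_rfl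
        intro mid h0 hmr hcond
        rcases hcond with h | h
        · omega
        · have h1 : r ≤ s.getD (s.length - 1) 0 := sorted_le_last s hsort r hrs
          have h2 : mid = r := by omega
          show ¬ calculate numbers mid ≤ value
          rw [h2, hsum]
          omega
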